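-- pv_equiv track=rewrite | github.com/oditirathi20/bharatbricks_hackathon | backend/app.py | _occupation_category
-- ===== SOURCE A (Python) =====
-- def _occupation_category(occupation: str) -> str:
--     text = str(occupation or "").strip().lower()
--     if any(token in text for token in ["farmer", "farm", "agri", "cultivator"]):
--         return "agriculture"
--     if any(token in text for token in ["student", "school", "college"]):
--         return "education"
--     if any(token in text for token in ["business", "shop", "trader", "startup"]):
--         return "business"
--     if any(token in text for token in ["worker", "labour", "daily", "employment"]):
--         return "employment"
--     return "general"
-- ===== SOURCE B (Python) =====
-- _TOKEN_CATEGORY = {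
--     "farmer": "agriculture", "farm": "agriculture", "agri": "agriculture",
--     "cultivator": "agriculture",
--     "student": "education", "school": "education", "college": "education",
--     "business": "business", "shop": "business", "trader": "business",
--     "startup": "business",
--     "worker": "employment", "labour": "employment", "daily": "employment",
--     "employment": "employment",
-- }
-- _PRIORITY = {"agriculture": 0, "education": 1, "business": 2, "employment": 3}
--
--
-- def _occupation_category(occupation: str) -> str:
--     text = str(occupation or "").strip().lower()
--     best = None
--     for token, category in _TOKEN_CATEGORY.items():
--         if token in text and (best is None or _PRIORITY[category] < _PRIORITY[best]):
--             best = category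
--     return best if best is not None else "general"
-- ===== Notes on version B (the rewrite author's own statement) =====
-- stated objective: alternative
-- what changed: Replaces the early-return chain of four keyword-group tests with a single pass over a flat token-to-category map that keeps the minimum-priority matching category in an accumulator; equivalent because category priority is exactly A's branch order.
import Mathlib
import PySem

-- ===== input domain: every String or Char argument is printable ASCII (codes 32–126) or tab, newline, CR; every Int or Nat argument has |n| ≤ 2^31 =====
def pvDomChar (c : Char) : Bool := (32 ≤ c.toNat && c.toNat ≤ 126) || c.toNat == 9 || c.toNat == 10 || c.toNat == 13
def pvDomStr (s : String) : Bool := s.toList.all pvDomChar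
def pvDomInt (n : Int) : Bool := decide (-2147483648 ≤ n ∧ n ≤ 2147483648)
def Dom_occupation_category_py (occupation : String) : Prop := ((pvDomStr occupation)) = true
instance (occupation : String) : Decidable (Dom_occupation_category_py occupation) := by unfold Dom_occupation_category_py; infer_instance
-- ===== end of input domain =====

-- B replaces A's early-return if-chain with one pass over a flat token→category map, keeping the minimum-priority matching category in an accumulator (objective: alternative decomposition).

-- ===== PORT A =====
def occupation_category_py (occupation : String) : String :=
  let text := PySem.Str.lower (PySem.Str.strip occupation)
  if (["farmer", "farm", "agri", "cultivator"].any (fun token => PySem.Str.isIn token text)) then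
    "agriculture"
  else if (["student", "school", "college"].any (fun token => PySem.Str.isIn token text)) then
    "education"
  else if (["business", "shop", "trader", "startup"].any (fun token => PySem.Str.isIn token text)) then
    "business"
  else if (["worker", "labour", "daily", "employment"].any (fun token => PySem.Str.isIn token text)) then
    "employment"
  else
    "general"

-- ===== PORT B =====
-- _TOKEN_CATEGORY: flat token → category map (a Python dict, iterated with .items())
def pvTokenCategory : List (String × String) :=
  [("farmer", "agriculture"),
   ("farm", "agriculture"),
   ("agri", "agriculture"),
   ("cultivator", "agriculture"),
   ("student", "education"),
   ("school", "education"),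
   ("college", "education"),
   ("business", "business"),
   ("shop", "business"),
   ("trader", "business"),
   ("startup", "business"),
   ("worker", "employment"),
   ("labour", "employment"),
   ("daily", "employment"),
   ("employment", "employment")]

-- _PRIORITY dict; lookup _PRIORITY[c] (KeyError impossible: every stored category is a key)
def pvPriorityDict : PySem.Dict String Int :=
  PySem.Dict.ofList [("agriculture", 0), ("education", 1), ("business", 2), ("employment", 3)]

def pvPrio (c : String) : Int := (PySem.Dict.get? pvPriorityDict c).getD 0

-- the loop body: keep `best` unless this token matches and its category has strictly smaller priority
def pvStep (text : String) (best : Option String) (tc : String × String) : Option String :=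
  if PySem.Str.isIn tc.1 text &&
     (match best with
      | none => true
      | some b => decide (pvPrio tc.2 < pvPrio b))
  then some tc.2 else best

def occupation_category_py_alt (occupation : String) : String :=
  let text := PySem.Str.lower (PySem.Str.strip occupation)
  match pvTokenCategory.foldl (pvStep text) none with
  | some c => c
  | none => "general"

-- ===== PRECONDITION & SPEC =====
def Spec_occupation_category_py (occupation : String) (out : String) : Prop := out = occupation_category_py_alt occupation
instance (occupation : String) (out : String) : Decidable (Spec_occupation_category_py occupation out) := by unfold Spec_occupation_category_py; infer_instance

-- ===== CLAIM =====
def Claim_equal_occupation_category_py : Prop := ∀ (occupation : String), Dom_occupation_category_py occupation → Spec_occupation_category_py occupation (occupation_category_py occupation)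

-- ===== LEMMAS AND PROOFS =====
-- a non-matching token leaves an empty accumulator empty
theorem pvStep_skip (text : String) (tc : String × String)
    (h : PySem.Str.isIn tc.1 text = false) : pvStep text none tc = none := by
  unfold pvStep; rw [h]; rfl

-- the first matching token fills the empty accumulator with its category
theorem pvStep_hit (text : String) (tc : String × String)
    (h : PySem.Str.isIn tc.1 text = true) : pvStep text none tc = some tc.2 := by
  unfold pvStep; rw [h]; rfl

-- once `best` holds a category no cheaper than everything still in the list, the fold never changes it
theorem pvStep_absorb (text : String) (c : String) (l : List (String × String))
    (h : ∀ tc ∈ l, pvPrio c ≤ pvPrio tc.2) :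
    l.foldl (pvStep text) (some c) = some c := by
  induction l with
  | nil => rfl
  | cons hd tl ih =>
    have hhd : pvPrio c ≤ pvPrio hd.2 := h hd (List.mem_cons_self)
    have hstep : pvStep text (some c) hd = some c := by
      unfold pvStep
      have hdec : decide (pvPrio hd.2 < pvPrio c) = false := by
        simp only [decide_eq_false_iff_not]; omega
      simp [hdec]
    rw [List.foldl_cons, hstep]
    exact ih (fun tc htc => h tc (List.mem_cons_of_mem _ htc))

-- first-match semantics of a token table
def pvFirstMatch (text : String) : List (String × String) → String
  | [] => "general"
  | tc :: rest => if PySem.Str.isIn tc.1 text then tc.2 else pvFirstMatch text rest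

-- on a table sorted by nondecreasing priority, the min-priority fold IS first match
theorem fold_eq_firstMatch (text : String) (l : List (String × String))
    (hsort : l.Pairwise (fun a b => pvPrio a.2 ≤ pvPrio b.2)) :
    (match l.foldl (pvStep text) none with
     | some c => c
     | none => "general") = pvFirstMatch text l := by
  induction l with
  | nil => rfl
  | cons hd tl ih =>
    rw [List.foldl_cons]
    by_cases h : PySem.Str.isIn hd.1 text = true
    · rw [pvStep_hit text _ h,
        pvStep_absorb text _ _ (fun tc htc => (List.pairwise_cons.mp hsort).1 tc htc)]
      simp only [pvFirstMatch, h, reduceIte]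
    · rw [Bool.not_eq_true] at h
      rw [pvStep_skip text _ h]
      rw [ih (List.pairwise_cons.mp hsort).2]
      have h' : PySem.Chars.isIn hd.1.toList text.toList = false := by
        simpa [PySem.Str.isIn] using h
      simp [pvFirstMatch, h']

-- distribute an if over a Boolean disjunction
theorem ite_or_str (a b : Bool) (x y : String) :
    (if (a || b) = true then x else y) = if a = true then x else if b = true then x else y := by
  cases a <;> cases b <;> simp

set_option maxHeartbeats 1000000 in
theorem core_eq (text : String) :
    (if (["farmer", "farm", "agri", "cultivator"].any (fun token => PySem.Str.isIn token text)) then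
      "agriculture"
    else if (["student", "school", "college"].any (fun token => PySem.Str.isIn token text)) then
      "education"
    else if (["business", "shop", "trader", "startup"].any (fun token => PySem.Str.isIn token text)) then
      "business"
    else if (["worker", "labour", "daily", "employment"].any (fun token => PySem.Str.isIn token text)) then
      "employment"
    else
      "general") =
    (match pvTokenCategory.foldl (pvStep text) none with
    | some c => c
    | none => "general") := by
  rw [fold_eq_firstMatch text pvTokenCategory (by decide)]
  simp only [List.any_cons, List.any_nil, Bool.or_false, ite_or_str,
    pvTokenCategory, pvFirstMatch]

-- ===== VERDICT =====
set_option maxHeartbeats 1000000 in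
theorem occupation_category_py_spec : Claim_equal_occupation_category_py := by
  intro occupation _
  unfold Spec_occupation_category_py occupation_category_py occupation_category_py_alt
  exact core_eq (PySem.Str.lower (PySem.Str.strip occupation))
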